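-- pv_equiv track=rewrite | github.com/Mozoltov821/bonsai | bonsai/models/mimo_audio/test/test_end_to_end.py | insert_between
-- ===== SOURCE A (Python) =====
-- def insert_between(tokens: list, group_size: int, fill_value: int) -> list:
--     """
--     在tokens之间插入填充值以满足group_size要求。
--
--     例如：group_size=4时，[A, B, C] -> [A, fill, fill, fill, B, fill, fill, fill, C, fill, fill, fill]
--
--     Args:
--         tokens: 原始token列表
--         group_size: 分组大小
--         fill_value: 填充值（通常使用pad_token_id）
--
--     Returns:
--         插入填充后的token列表
--     """
--     if group_size <= 1:
--         return tokens
--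
--     result = []
--     for token in tokens:
--         result.append(token)
--         # 在每个token后添加(group_size - 1)个填充值
--         result.extend([fill_value] * (group_size - 1))
--
--     return result
-- ===== SOURCE B (Python) =====
-- def insert_between(tokens: list, group_size: int, fill_value: int) -> list:
--     if group_size <= 1:
--         return tokens
--     n = len(tokens)
--     result = [fill_value] * (n * group_size)
--     for i, token in enumerate(tokens):
--         result[i * group_size] = token
--     return result
-- ===== Notes on version B (the rewrite author's own statement) =====
-- stated objective: alternative
-- what changed: B pre-allocates one buffer of n*group_size fill values and scatters each token into slot i*group_size, instead of A's incremental append+extend loop.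
import Mathlib
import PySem

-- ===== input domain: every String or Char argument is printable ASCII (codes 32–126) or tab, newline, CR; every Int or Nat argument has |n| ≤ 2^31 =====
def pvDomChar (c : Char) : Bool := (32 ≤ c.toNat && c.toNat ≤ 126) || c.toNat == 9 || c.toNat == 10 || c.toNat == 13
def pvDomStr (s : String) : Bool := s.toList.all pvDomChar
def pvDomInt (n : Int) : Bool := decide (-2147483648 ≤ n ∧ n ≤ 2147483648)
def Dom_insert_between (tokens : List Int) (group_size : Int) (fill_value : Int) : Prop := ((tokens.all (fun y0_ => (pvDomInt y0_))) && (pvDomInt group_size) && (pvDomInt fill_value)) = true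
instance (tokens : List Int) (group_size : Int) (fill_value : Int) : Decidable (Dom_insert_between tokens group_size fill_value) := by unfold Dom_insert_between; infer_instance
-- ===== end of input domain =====

-- ===== PORT A =====
-- B pre-allocates a fill buffer and scatters tokens into slot i*group_size instead of A's append/extend loop (alternative decomposition; same cost).
def insert_between (tokens : List Int) (group_size : Int) (fill_value : Int) : List Int :=
  if group_size ≤ 1 then tokens
  else
    tokens.foldl (fun result token =>
      (result ++ [token]) ++ List.replicate (group_size - 1).toNat fill_value) []

-- ===== PORT B =====
def insert_between_alt (tokens : List Int) (group_size : Int) (fill_value : Int) : List Int :=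
  if group_size ≤ 1 then tokens
  else
    let n := tokens.length
    let init := List.replicate (n * group_size.toNat) fill_value
    (PySem.List.enumerate tokens).foldl
      (fun result p => PySem.List.pySetD result (p.1 * group_size) p.2) init

-- ===== PRECONDITION & SPEC =====
def Spec_insert_between (tokens : List Int) (group_size : Int) (fill_value : Int) (out : List Int) : Prop := out = insert_between_alt tokens group_size fill_value
instance (tokens : List Int) (group_size : Int) (fill_value : Int) (out : List Int) : Decidable (Spec_insert_between tokens group_size fill_value out) := by unfold Spec_insert_between; infer_instance

-- ===== CLAIM (what is proved, stated in full; the proofs are below) =====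
def Claim_equal_insert_between : Prop := ∀ (tokens : List Int) (group_size : Int) (fill_value : Int), Dom_insert_between tokens group_size fill_value → Spec_insert_between tokens group_size fill_value (insert_between tokens group_size fill_value)

-- ===== LEMMAS AND PROOFS =====

-- B's scatter loop, generalized over an already-filled prefix of k groups.
theorem scatter_eq_flatMap (g : Nat) (hg : 1 ≤ g) (fv : Int) :
    ∀ (ts pre : List Int) (k : Nat), pre.length = k * g →
      (PySem.List.enumerate ts (k : Int)).foldl
          (fun result p => PySem.List.pySetD result (p.1 * (g : Int)) p.2)
          (pre ++ List.replicate (ts.length * g) fv)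
      = pre ++ ts.flatMap (fun t => t :: List.replicate (g - 1) fv) := by
  intro ts
  induction ts with
  | nil => intro pre k hk; simp [PySem.List.enumerate_nil]
  | cons t ts ih =>
    intro pre k hk
    rw [PySem.List.enumerate_cons]
    simp only [List.foldl_cons]
    have hlen : (t :: ts).length * g = g + ts.length * g := by
      simp [List.length_cons]; ring
    have hfill : List.replicate ((t :: ts).length * g) fv
        = (fv :: List.replicate (g - 1) fv) ++ List.replicate (ts.length * g) fv := by
      rw [hlen, List.replicate_add]
      congr 1
      cases g with
      | zero => omega
      | succ m => simp [List.replicate_succ]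
    have hcast : (k : Int) * (g : Int) = ((k * g : Nat) : Int) := by push_cast; ring
    rw [hfill, hcast, PySem.List.pySetD_natCast, ← hk]
    have hset : ((pre ++ (fv :: List.replicate (g - 1) fv)) ++ List.replicate (ts.length * g) fv).set
          pre.length t
        = (pre ++ (t :: List.replicate (g - 1) fv)) ++ List.replicate (ts.length * g) fv := by
      simp [List.append_assoc]
    rw [← List.append_assoc, hset]
    have hk' : (pre ++ (t :: List.replicate (g - 1) fv)).length = (k + 1) * g := by
      simp [List.length_append, hk, Nat.succ_mul]; omega
    have hih := ih (pre ++ (t :: List.replicate (g - 1) fv)) (k + 1) hk'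
    push_cast at hih
    simp only [List.cons_append, List.append_assoc] at hih ⊢
    rw [hih]
    simp [List.flatMap_cons]

-- ===== VERDICT (by name: the statement is the Claim_ definition above) =====
theorem insert_between_spec : Claim_equal_insert_between := by
  intro tokens group_size fill_value _
  unfold Spec_insert_between insert_between insert_between_alt
  by_cases h : group_size ≤ 1
  · simp [h]
  · simp only [h, if_false]
    have hg : 1 ≤ group_size.toNat := by omega
    have hA : tokens.foldl (fun result token =>
        (result ++ [token]) ++ List.replicate (group_size - 1).toNat fill_value) []
        = tokens.flatMap (fun t => t :: List.replicate (group_size.toNat - 1) fill_value) := by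
      have hsub : (group_size - 1).toNat = group_size.toNat - 1 := by omega
      rw [hsub]
      have hfm := PySem.List.foldl_append_eq_flatMap
        (l := tokens) (acc := ([] : List Int))
        (g := fun t => t :: List.replicate (group_size.toNat - 1) fill_value)
      simp only [List.nil_append] at hfm
      rw [← hfm]
      simp [List.append_assoc]
    rw [hA]
    have hgs : ((group_size.toNat : Nat) : Int) = group_size := by omega
    have hs := scatter_eq_flatMap group_size.toNat hg fill_value tokens [] 0 (by simp)
    simp only [List.nil_append, Nat.cast_zero, hgs] at hs
    simpa using hs.symm
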